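-- pv_equiv track=rewrite | github.com/jonaprojects/kiwicalc | kiwicalc/auxiliary.py | equal_ignore_order
-- ===== SOURCE A (Python) =====
-- def equal_ignore_order(a, b):
--     """ Use only when elements are neither hashable nor sortable! """
--     if None in (a, b):
--         return False
--     if len(a) != len(b):
--         return False
--     unmatched = list(b)
--     for element in a:
--         try:
--             unmatched.remove(element)
--         except ValueError:
--             return False
--     return not unmatched
-- ===== SOURCE B (Python) =====
-- def equal_ignore_order(a, b):
--     """ Use only when elements are neither hashable nor sortable! """
--     if None in (a, b):
--         return False
--     if len(a) != len(b):
--         return False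
--     b = list(b)
--     for element in a:
--         if sum(1 for x in a if x == element) != sum(1 for x in b if x == element):
--             return False
--     return True
-- ===== Notes on version B (the rewrite author's own statement) =====
-- stated objective: idiomatic
-- what changed: B replaces A's consume-a-copy loop (list(b) with remove per element, catching ValueError) by a count-based multiset comparison: for each element of a it compares its occurrence count in a and in b.
import Mathlib
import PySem

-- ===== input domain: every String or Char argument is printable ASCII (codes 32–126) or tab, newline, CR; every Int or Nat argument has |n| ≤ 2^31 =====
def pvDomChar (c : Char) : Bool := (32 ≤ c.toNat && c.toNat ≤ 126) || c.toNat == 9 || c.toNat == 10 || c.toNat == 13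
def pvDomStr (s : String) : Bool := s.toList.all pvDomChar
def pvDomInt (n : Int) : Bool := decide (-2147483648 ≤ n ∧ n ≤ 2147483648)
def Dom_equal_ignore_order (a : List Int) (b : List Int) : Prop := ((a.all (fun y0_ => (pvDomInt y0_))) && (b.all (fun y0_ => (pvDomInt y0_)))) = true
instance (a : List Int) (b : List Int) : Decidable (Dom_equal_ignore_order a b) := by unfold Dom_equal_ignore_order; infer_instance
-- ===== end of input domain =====

-- B replaces A's consume-a-copy loop (remove per element, ValueError → False) by a
-- count-based multiset comparison; same behaviour, a different decomposition (idiomatic).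
-- The Python-level `None in (a, b)` guard is vacuous under the List Int typing and has no Lean counterpart.

-- ===== PORT A =====
-- the for-loop over a: `unmatched.remove(element)`; ValueError (remove? = none) → return False
def eioLoopA (unmatched : List Int) : List Int → Option (List Int)
  | [] => some unmatched
  | e :: rest =>
    match PySem.List.remove? unmatched e with
    | none => none
    | some u => eioLoopA u rest

def equal_ignore_order (a : List Int) (b : List Int) : Bool :=
  if a.length ≠ b.length then false
  else
    match eioLoopA b a with
    | none => false            -- except ValueError: return False
    | some u => u.isEmpty      -- return not unmatched

-- ===== PORT B =====
-- the for-loop over a, comparing occurrence counts (sum(1 for x in xs if x == e) = countP)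
def eioLoopB (a : List Int) (b : List Int) : List Int → Bool
  | [] => true
  | e :: rest =>
    if a.countP (· == e) ≠ b.countP (· == e) then false
    else eioLoopB a b rest

def equal_ignore_order_alt (a : List Int) (b : List Int) : Bool :=
  if a.length ≠ b.length then false
  else eioLoopB a b a

-- ===== PRECONDITION & SPEC =====
def Spec_equal_ignore_order (a : List Int) (b : List Int) (out : Bool) : Prop := out = equal_ignore_order_alt a b
instance (a : List Int) (b : List Int) (out : Bool) : Decidable (Spec_equal_ignore_order a b out) := by unfold Spec_equal_ignore_order; infer_instance

-- ===== CLAIM (what is proved, stated in full; the proofs are below) =====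
def Claim_equal_equal_ignore_order : Prop := ∀ (a : List Int) (b : List Int), Dom_equal_ignore_order a b → Spec_equal_ignore_order a b (equal_ignore_order a b)

-- ===== LEMMAS AND PROOFS =====

-- A's loop succeeds exactly when a fits in u as a multiset, and returns the leftover
theorem eioLoopA_some {a u v : List Int} (h : eioLoopA u a = some v) :
    ((a : Multiset Int) ≤ (u : Multiset Int)) ∧ ((v : Multiset Int) = (u : Multiset Int) - (a : Multiset Int)) := by
  induction a generalizing u with
  | nil =>
    simp [eioLoopA] at h
    subst h; simp
  | cons e rest ih =>
    simp only [eioLoopA] at h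
    cases hr : PySem.List.remove? u e with
    | none => rw [hr] at h; cases h
    | some u' =>
      have he : e ∈ u := by
        by_contra hne
        rw [(PySem.List.remove?_eq_none_iff _ _).2 hne] at hr; cases hr
      rw [hr] at h
      dsimp only at h
      have hu' : u' = u.erase e := by
        rw [PySem.List.remove?_eq_some_erase _ _ he] at hr
        exact (Option.some.injEq _ _ ▸ hr).symm
      obtain ⟨hle, hv⟩ := ih h
      subst hu'
      rw [← Multiset.coe_erase] at hle hv
      constructor
      · have := Multiset.cons_le_cons e hle
        rwa [Multiset.cons_erase (by exact_mod_cast he)] at this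
      · rw [hv, ← Multiset.cons_coe, Multiset.sub_cons]

theorem eioLoopA_none {a u : List Int} (h : eioLoopA u a = none) :
    ¬ ((a : Multiset Int) ≤ (u : Multiset Int)) := by
  induction a generalizing u with
  | nil => simp [eioLoopA] at h
  | cons e rest ih =>
    intro hle
    simp only [eioLoopA] at h
    have he : e ∈ u := by
      have : e ∈ (u : Multiset Int) := Multiset.mem_of_le hle (by simp)
      exact_mod_cast this
    rw [PySem.List.remove?_eq_some_erase _ _ he] at h
    dsimp only at h
    have hrest : (rest : Multiset Int) ≤ ((u.erase e : List Int) : Multiset Int) := by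
      rw [← Multiset.coe_erase]
      have := hle
      rw [← Multiset.cons_erase (s := (u : Multiset Int)) (a := e) (by exact_mod_cast he)] at this
      exact (Multiset.cons_le_cons_iff _).1 this
    exact ih h hrest

-- B's loop is a conjunction of count equalities over the scanned list
theorem eioLoopB_true_iff (a b : List Int) : ∀ l, eioLoopB a b l = true ↔ ∀ e ∈ l, a.countP (· == e) = b.countP (· == e) := by
  intro l
  induction l with
  | nil => simp [eioLoopB]
  | cons e rest ih =>
    simp only [eioLoopB]
    by_cases h : a.countP (· == e) = b.countP (· == e)
    · simp [h, ih]
    · simp [h]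

theorem countP_beq_eq_count (xs : List Int) (e : Int) : xs.countP (· == e) = xs.count e := by
  simp [List.count_eq_countP]

-- both sides return true exactly when lengths match and a ≤ b as multisets
theorem alt_true_iff (a b : List Int) :
    equal_ignore_order_alt a b = true ↔ (a.length = b.length ∧ (a : Multiset Int) ≤ (b : Multiset Int)) := by
  unfold equal_ignore_order_alt
  by_cases hl : a.length = b.length
  · simp only [hl, ne_eq, not_true_eq_false, if_false]
    rw [eioLoopB_true_iff]
    constructor
    · intro h
      refine ⟨by simp, Multiset.le_iff_count.2 fun e => ?_⟩
      by_cases he : e ∈ a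
      · have := h e he
        rw [countP_beq_eq_count, countP_beq_eq_count] at this
        simp [Multiset.coe_count, this]
      · simp [Multiset.coe_count, List.count_eq_zero_of_not_mem he]
    · rintro ⟨-, hle⟩ e _
      have heq : (a : Multiset Int) = (b : Multiset Int) := Multiset.eq_of_le_of_card_le hle (by simp [hl])
      have := congrArg (Multiset.count e) heq
      simp only [Multiset.coe_count] at this
      rw [countP_beq_eq_count, countP_beq_eq_count, this]
  · simp [hl]

theorem a_true_iff (a b : List Int) :
    equal_ignore_order a b = true ↔ (a.length = b.length ∧ (a : Multiset Int) ≤ (b : Multiset Int)) := by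
  unfold equal_ignore_order
  by_cases hl : a.length = b.length
  · simp only [hl, ne_eq, not_true_eq_false, if_false]
    cases hr : eioLoopA b a with
    | none =>
      simp only [Bool.false_eq_true, false_iff]
      rintro ⟨-, hle⟩
      exact eioLoopA_none hr hle
    | some v =>
      obtain ⟨hle, hv⟩ := eioLoopA_some hr
      simp only [List.isEmpty_iff]
      constructor
      · intro _; exact ⟨by simp, hle⟩
      · rintro ⟨-, -⟩
        have heq : (a : Multiset Int) = (b : Multiset Int) := Multiset.eq_of_le_of_card_le hle (by simp [hl])
        have : (v : Multiset Int) = 0 := by rw [hv, heq, tsub_self]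
        simpa using this
  · simp [hl]

-- ===== VERDICT (by name: the statement is the Claim_ definition above) =====
theorem equal_ignore_order_spec : Claim_equal_equal_ignore_order := by
  intro a b _
  unfold Spec_equal_ignore_order
  have h := (a_true_iff a b).trans (alt_true_iff a b).symm
  cases hA : equal_ignore_order a b <;> cases hB : equal_ignore_order_alt a b <;> simp_all
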